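-- pv_equiv track=rewrite | github.com/lsankar4033/programming_gym | project_euler/37/src/main.py | truncations
-- ===== SOURCE A (Python) =====
-- def truncate(n, left=True):
--     sn = str(n)
--     if len(sn) == 1:
--         return None
--
--     tsn = sn[1:] if left else sn[0:-1]
--     return int(tsn)
--
-- def truncations(n):
--     truncs = set([n])
--
--     next_n = truncate(n, True)
--     while next_n is not None:
--         truncs.add(next_n)
--         next_n = truncate(next_n, True)
--
--     next_n = truncate(n, False)
--     while next_n is not None:
--         truncs.add(next_n)
--         next_n = truncate(next_n, False)
--
--     return truncs
-- ===== SOURCE B (Python) =====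
-- def truncations(n):
--     def chain(m, left):
--         s = str(m)
--         if len(s) == 1:
--             return []
--         t = int(s[1:] if left else s[:-1])
--         return [t] + chain(t, left)
--
--     out = {n}
--     out.update(chain(n, True))
--     out.update(chain(n, False))
--     return out
-- ===== Notes on version B (the rewrite author's own statement) =====
-- stated objective: alternative
-- what changed: Replaces A's None-sentinel truncate helper and two while loops that mutate the set element by element with a single recursive helper that returns each truncation chain as a list, which is then bulk-added to the set.
import Mathlib
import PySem

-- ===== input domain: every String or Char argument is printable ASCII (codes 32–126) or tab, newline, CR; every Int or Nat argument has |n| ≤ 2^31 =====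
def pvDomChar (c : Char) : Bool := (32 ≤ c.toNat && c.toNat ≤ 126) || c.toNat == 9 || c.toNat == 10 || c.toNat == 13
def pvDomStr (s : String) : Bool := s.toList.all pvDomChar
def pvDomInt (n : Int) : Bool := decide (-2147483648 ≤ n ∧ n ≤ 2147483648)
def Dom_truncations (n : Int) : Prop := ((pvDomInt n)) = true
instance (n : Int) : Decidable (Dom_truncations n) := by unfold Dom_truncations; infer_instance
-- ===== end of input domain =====

-- B rebuilds each truncation chain as a recursive list (one recursive helper + bulk set updates)
-- instead of A's sentinel-driven while loops adding elements one by one; objective: alternative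
-- decomposition, same cost.


-- ===== PORT A =====
-- truncate(n, left): str, length test, slice, int; `none` covers both Python's `return None`
-- (single-character string) and int('-')'s ValueError (the latter only reachable outside Pre_).
def truncateA (n : Int) (left : Bool) : Option Int :=
  let sn := PySem.Int.toStr n
  if PySem.Str.len sn = 1 then none
  else
    let tsn := if left then PySem.Str.slice sn (some 1) none else PySem.Str.slice sn (some 0) (some (-1))
    PySem.Int.ofStr? tsn

-- one `while next_n is not None:` loop of A; fuel only makes the recursion structural
-- (inside Pre_ every truncation step shortens str(n), so |str(n)| fuel is never exhausted).
def loopA (fuel : Nat) (left : Bool) (next : Option Int) (truncs : PySem.Set Int) : PySem.Set Int :=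
  match fuel with
  | 0 => truncs
  | f + 1 =>
    match next with
    | none => truncs
    | some v => loopA f left (truncateA v left) (PySem.Set.add truncs v)

def truncations (n : Int) : List Int :=
  let fuel := (PySem.Int.toChars n).length
  let truncs : PySem.Set Int := PySem.Set.ofList [n]
  let truncs := loopA fuel true (truncateA n true) truncs
  loopA fuel false (truncateA n false) truncs

-- ===== PORT B =====
-- chain(m, left) of Source B: the list of repeated truncations of m (same fuel guard as A's loops).
def chainB (fuel : Nat) (m : Int) (left : Bool) : List Int :=
  match fuel with
  | 0 => []
  | f + 1 =>
    let s := PySem.Int.toStr m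
    if PySem.Str.len s = 1 then []
    else
      match PySem.Int.ofStr? (if left then PySem.Str.slice s (some 1) none else PySem.Str.slice s (some 0) (some (-1))) with
      | none => []
      | some t => t :: chainB f t left

def truncations_alt (n : Int) : List Int :=
  let fuel := (PySem.Int.toChars n).length
  let out : PySem.Set Int := PySem.Set.ofList [n]
  let out := PySem.Set.update out (chainB fuel n true)
  PySem.Set.update out (chainB fuel n false)

-- ===== PRECONDITION & SPEC =====
-- Pre_ excludes exactly the negative n: there Python A raises ValueError (int('-') in the
-- right-truncation chain), returning no value.
def Pre_truncations (n : Int) : Prop := 0 ≤ n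
instance (n : Int) : Decidable (Pre_truncations n) := by unfold Pre_truncations; infer_instance
def pvWitness_truncations : Int := (1012)

def Spec_truncations (n : Int) (out : List Int) : Prop := out = truncations_alt n
instance (n : Int) (out : List Int) : Decidable (Spec_truncations n out) := by unfold Spec_truncations; infer_instance

-- ===== CLAIM (what is proved, stated in full; the proofs are below) =====
def Claim_equal_truncations : Prop := ∀ (n : Int), Dom_truncations n → Pre_truncations n → Spec_truncations n (truncations n)

-- ===== LEMMAS AND PROOFS =====

-- A's while loop over the truncation chain is B's chain list folded into the set.
theorem loopA_eq_update_chainB (fuel : Nat) :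
    ∀ (m : Int) (left : Bool) (acc : PySem.Set Int),
      loopA fuel left (truncateA m left) acc = PySem.Set.update acc (chainB fuel m left) := by
  induction fuel with
  | zero =>
    intro m left acc
    simp [loopA, chainB, PySem.Set.update]
  | succ f ih =>
    intro m left acc
    rw [loopA.eq_def, chainB.eq_def]
    simp only [truncateA, PySem.Str.len, PySem.Int.toList_toStr, Nat.cast_eq_one]
    by_cases h1 : (PySem.Int.toChars m).length = 1
    · simp [h1, PySem.Set.update]
    · simp only [h1, if_false]
      cases hv : PySem.Int.ofStr?
          (if left then PySem.Str.slice (PySem.Int.toStr m) (some 1) none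
           else PySem.Str.slice (PySem.Int.toStr m) (some 0) (some (-1))) with
      | none => simp [PySem.Set.update]
      | some v =>
        simp only [PySem.Set.update, List.foldl_cons]
        have h := ih v left (PySem.Set.add acc v)
        simpa [truncateA, PySem.Str.len, PySem.Int.toList_toStr, Nat.cast_eq_one, PySem.Set.update] using h

-- ===== VERDICT (by name: the statement is the Claim_ definition above) =====
theorem truncations_spec : Claim_equal_truncations := by
  intro n _ _
  unfold Spec_truncations truncations truncations_alt
  rw [loopA_eq_update_chainB, loopA_eq_update_chainB]
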